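-- pv_equiv track=rewrite | github.com/krastin/pp-cs3.0 | chapter-11/exercise09.py | dict_intersect
-- ===== SOURCE A (Python) =====
-- from typing import Dict
--
-- def dict_intersect(dict1: Dict, dict2: Dict) -> Dict:
--     """takes two dictionaries as argument
--     and returns a dictionary that contains only the key/value pairs
--     found in both of the original dictionaries
--     >>> a = {'a': 1, 'b': 2, 'c': 3};
--     >>> b = {'b': 2, 'c': 5, 'd': 6, 'e': 7};
--     >>> dict_intersect(a,b)
--     {'b': 2}
--     """
--     intersection = {}
--     smaller_dictionary = dict1 if len(dict1) <= len(dict2) else dict2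
--     longer_dictionary = dict2 if len(dict1) <= len(dict2) else dict1
--     for k,v in smaller_dictionary.items():
--         if k in longer_dictionary and longer_dictionary[k] == v:
--             intersection[k] = v
--     return intersection
-- ===== SOURCE B (Python) =====
-- def dict_intersect(dict1, dict2):
--     """Sort-merge join: sort both item lists by key, walk them with two
--     pointers collecting matching (key, value) pairs (tagged with their
--     position in the smaller dict), then rebuild in the smaller dict's order."""
--     small, big = (dict1, dict2) if len(dict1) <= len(dict2) else (dict2, dict1)
--     left = sorted(enumerate(small.items()), key=lambda t: t[1][0])
--     right = sorted(big.items(), key=lambda kv: kv[0])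
--     matches = []
--     i = j = 0
--     while i < len(left) and j < len(right):
--         idx, (k, v) = left[i]
--         k2, v2 = right[j]
--         if k < k2:
--             i += 1
--         elif k2 < k:
--             j += 1
--         else:
--             if v == v2:
--                 matches.append((idx, k, v))
--             i += 1
--             j += 1
--     matches.sort(key=lambda t: t[0])
--     return {k: v for _, k, v in matches}
-- ===== Notes on version B (the rewrite author's own statement) =====
-- stated objective: alternative
-- what changed: Replaces A's hash-membership filter loop by a sort-merge join: both item lists are sorted by key, a two-pointer merge collects the matching pairs tagged with their position in the smaller dict, and a final sort by position restores the smaller dict's insertion order.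
import Mathlib
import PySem

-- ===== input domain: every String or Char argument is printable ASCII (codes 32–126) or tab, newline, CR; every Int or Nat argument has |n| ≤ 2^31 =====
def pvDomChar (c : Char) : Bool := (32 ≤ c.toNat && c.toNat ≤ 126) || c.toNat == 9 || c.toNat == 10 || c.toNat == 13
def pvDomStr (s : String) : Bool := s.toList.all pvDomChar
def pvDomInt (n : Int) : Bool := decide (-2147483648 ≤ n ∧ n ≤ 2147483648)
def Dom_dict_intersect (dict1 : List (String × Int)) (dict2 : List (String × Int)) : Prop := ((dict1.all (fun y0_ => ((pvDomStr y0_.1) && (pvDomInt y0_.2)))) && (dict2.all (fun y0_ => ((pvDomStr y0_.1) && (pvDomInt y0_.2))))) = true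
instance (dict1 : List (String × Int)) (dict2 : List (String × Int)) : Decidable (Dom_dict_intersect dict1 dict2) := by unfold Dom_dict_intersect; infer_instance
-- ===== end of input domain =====

-- B replaces A's hash-membership filter loop by a sort-merge join (sort both item lists by
-- key, two-pointer merge of matches tagged with position, re-sort by position); alternative
-- algorithm, equivalence proved on key-unique inputs.

-- ===== PORT A =====
def dict_intersect (dict1 : List (String × Int)) (dict2 : List (String × Int)) : List (String × Int) :=
  let smaller := if dict1.length ≤ dict2.length then dict1 else dict2
  let longer  := if dict1.length ≤ dict2.length then dict2 else dict1
  -- 'k in longer and longer[k] == v': the guarded indexing cannot raise, ported as getD behind contains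
  (smaller.foldl
    (fun (acc : PySem.Dict String Int) kv =>
      if (PySem.Dict.mk longer).contains kv.1 && ((PySem.Dict.mk longer).getD kv.1 0 == kv.2)
      then acc.insert kv.1 kv.2 else acc)
    PySem.Dict.empty).items

-- ===== PORT B =====
-- the two-pointer while loop over left/right, as recursion consuming the two lists
def pvMergeJoin : List (Int × String × Int) → List (String × Int) → List (Int × String × Int)
  | [], _ => []
  | _ :: _, [] => []
  | t :: ls, (k2, v2) :: rs =>
      if t.2.1 < k2 then pvMergeJoin ls ((k2, v2) :: rs)
      else if k2 < t.2.1 then pvMergeJoin (t :: ls) rs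
      else (if t.2.2 == v2 then [t] else []) ++ pvMergeJoin ls rs
  termination_by l r => l.length + r.length

def dict_intersect_alt (dict1 : List (String × Int)) (dict2 : List (String × Int)) : List (String × Int) :=
  let small := if dict1.length ≤ dict2.length then dict1 else dict2
  let big   := if dict1.length ≤ dict2.length then dict2 else dict1
  let left  := PySem.List.sorted (PySem.List.enumerate small) (fun t => t.2.1) false
  let right := PySem.List.sorted big (fun kv => kv.1) false
  let ms    := PySem.List.sorted (pvMergeJoin left right) (fun t => t.1) false
  -- the dict comprehension over the matches
  (ms.foldl (fun (acc : PySem.Dict String Int) t => acc.insert t.2.1 t.2.2) PySem.Dict.empty).items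

-- ===== PRECONDITION & SPEC =====
-- Pre_ requires each association list to have unique keys: the parameters stand for Python
-- dicts, whose keys are unique by construction, so no Python input is excluded.
def Pre_dict_intersect (dict1 : List (String × Int)) (dict2 : List (String × Int)) : Prop :=
  (dict1.map Prod.fst).Nodup ∧ (dict2.map Prod.fst).Nodup
instance (dict1 : List (String × Int)) (dict2 : List (String × Int)) : Decidable (Pre_dict_intersect dict1 dict2) := by unfold Pre_dict_intersect; infer_instance
def pvWitness_dict_intersect : (List (String × Int)) × (List (String × Int)) :=
  ([("a", 1), ("b", 2), ("c", 3)], [("b", 2), ("c", 5), ("d", 6), ("e", 7)])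
def Spec_dict_intersect (dict1 : List (String × Int)) (dict2 : List (String × Int)) (out : List (String × Int)) : Prop := out = dict_intersect_alt dict1 dict2
instance (dict1 : List (String × Int)) (dict2 : List (String × Int)) (out : List (String × Int)) : Decidable (Spec_dict_intersect dict1 dict2 out) := by unfold Spec_dict_intersect; infer_instance

-- ===== CLAIM (what is proved, stated in full; the proofs are below) =====
def Claim_equal_dict_intersect : Prop := ∀ (dict1 : List (String × Int)) (dict2 : List (String × Int)), Dom_dict_intersect dict1 dict2 → Pre_dict_intersect dict1 dict2 → Spec_dict_intersect dict1 dict2 (dict_intersect dict1 dict2)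

-- ===== LEMMAS AND PROOFS =====

-- A's guarded test equals a single get?-test, for every lookup list.
theorem cond_eq (big : List (String × Int)) (k : String) (v : Int) :
    ((PySem.Dict.mk big).contains k && ((PySem.Dict.mk big).getD k 0 == v))
      = ((PySem.Dict.mk big).get? k == some v) := by
  rw [PySem.Dict.contains_eq_isSome_get?, PySem.Dict.getD_eq_get?_getD]
  cases h : (PySem.Dict.mk big).get? k <;> simp

-- The conditional insert-loop over a key-unique list of fresh keys appends exactly the filter.
theorem items_foldl_filter (p : String × Int → Bool) :
    ∀ (l : List (String × Int)) (acc : PySem.Dict String Int),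
      (l.map Prod.fst).Nodup → (∀ kv ∈ l, acc.contains kv.1 = false) →
      (l.foldl (fun acc kv => if p kv then acc.insert kv.1 kv.2 else acc) acc).items
        = acc.items ++ l.filter p := by
  intro l
  induction l with
  | nil => intro acc _ _; simp
  | cons kv rest ih =>
    intro acc hnd hfresh
    simp only [List.map_cons, List.nodup_cons] at hnd
    cases hp : p kv with
    | true =>
      simp only [List.foldl_cons, List.filter_cons, hp, if_true]
      rw [ih (acc.insert kv.1 kv.2) hnd.2]
      · rw [PySem.Dict.items_insert_of_not_contains _ _ (hfresh kv (by simp))]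
        simp
      · intro kv' hkv'
        rw [PySem.Dict.contains_insert]
        have hne : kv'.1 ≠ kv.1 := by
          intro h
          have hm : kv'.1 ∈ rest.map Prod.fst := List.mem_map.mpr ⟨kv', hkv', rfl⟩
          exact hnd.1 (h ▸ hm)
        simp [hne, hfresh kv' (by simp [hkv'])]
    | false =>
      simp only [List.foldl_cons, List.filter_cons, hp, Bool.false_eq_true, if_false]
      exact ih acc hnd.2 (fun kv' h => hfresh kv' (by simp [h]))

-- nodup keys: get? characterised by membership
theorem get?_mk_nil_none (k : String) :
    (PySem.Dict.mk ([] : List (String × Int))).get? k = none := by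
  have h := PySem.Dict.get?_empty (κ := String) (ν := Int) (k := k)
  exact h

theorem get?_mk_some_iff (l : List (String × Int)) (k : String) (v : Int)
    (h : (l.map Prod.fst).Nodup) : (PySem.Dict.mk l).get? k = some v ↔ (k, v) ∈ l := by
  induction l with
  | nil => simp [get?_mk_nil_none]
  | cons kv rest ih =>
    obtain ⟨k1, v1⟩ := kv
    simp only [List.map_cons, List.nodup_cons] at h
    rw [PySem.Dict.get?_mk_cons]
    by_cases hk : k1 = k
    · subst hk
      simp only [BEq.rfl, if_true, Option.some_inj, List.mem_cons]
      constructor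
      · rintro rfl; exact Or.inl rfl
      · rintro (h' | h')
        · injection h' with _ h2; exact h2.symm
        · exact absurd (List.mem_map.mpr ⟨(k1, v), h', rfl⟩) h.1
    · have hb : (k1 == k) = false := by simp [hk]
      rw [hb]
      simp only [Bool.false_eq_true, if_false, List.mem_cons]
      rw [ih h.2]
      constructor
      · exact Or.inr
      · rintro (h' | h')
        · exact absurd (congrArg Prod.fst h').symm hk
        · exact h'

theorem get?_mk_none_iff (l : List (String × Int)) (k : String) :
    (PySem.Dict.mk l).get? k = none ↔ k ∉ l.map Prod.fst := by
  induction l with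
  | nil => simp [get?_mk_nil_none]
  | cons kv rest ih =>
    rw [PySem.Dict.get?_mk_cons]
    by_cases hk : kv.1 = k
    · simp [hk]
    · have : (kv.1 == k) = false := by simp [hk]
      rw [this]; simp [ih, Ne.symm hk]

-- get? is stable under permutation of a key-unique association list
theorem get?_mk_perm (l l' : List (String × Int)) (k : String)
    (hp : l.Perm l') (h : (l.map Prod.fst).Nodup) :
    (PySem.Dict.mk l').get? k = (PySem.Dict.mk l).get? k := by
  have h' : (l'.map Prod.fst).Nodup := (hp.map Prod.fst).nodup_iff.mp h
  cases hv : (PySem.Dict.mk l).get? k with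
  | none =>
    rw [get?_mk_none_iff] at hv ⊢
    exact fun hm => hv ((hp.map Prod.fst).mem_iff.mpr hm)
  | some v =>
    rw [get?_mk_some_iff _ _ _ h] at hv
    rw [get?_mk_some_iff _ _ _ h']
    exact hp.mem_iff.mp hv

-- the merge over two strictly key-sorted lists is the left filter by right-lookup
theorem mergeJoin_eq_filter (l : List (Int × String × Int)) (r : List (String × Int))
    (hl : l.Pairwise (fun a b => a.2.1 < b.2.1)) (hr : r.Pairwise (fun a b => a.1 < b.1)) :
    pvMergeJoin l r = l.filter (fun t => (PySem.Dict.mk r).get? t.2.1 == some t.2.2) := by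
  induction l, r using pvMergeJoin.induct with
  | case1 r => simp [pvMergeJoin]
  | case2 t ls =>
    rw [pvMergeJoin]
    rw [List.filter_eq_nil_iff.mpr]
    intro u _
    simp [get?_mk_nil_none]
  | case3 t ls k2 v2 rs hlt ih =>
    rw [pvMergeJoin, if_pos hlt]
    have hnone : (PySem.Dict.mk ((k2, v2) :: rs)).get? t.2.1 = none := by
      rw [get?_mk_none_iff]
      intro hm
      rcases List.mem_map.mp hm with ⟨u, hu, hk⟩
      rcases List.mem_cons.mp hu with h' | h'
      · subst h'; exact absurd (hk ▸ hlt) (lt_irrefl _)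
      · have : k2 < u.1 := (List.pairwise_cons.mp hr).1 u h'
        exact absurd (hk ▸ (hlt.trans this)) (lt_irrefl _)
    rw [List.filter_cons_of_neg (by simp [hnone])]
    exact ih hl.tail hr
  | case4 t ls k2 v2 rs hlt hgt ih =>
    rw [pvMergeJoin, if_neg hlt, if_pos hgt]
    rw [ih hl hr.tail]
    apply List.filter_congr
    intro u hu
    have hk2 : k2 < u.2.1 := by
      rcases List.mem_cons.mp hu with h' | h'
      · exact h' ▸ hgt
      · exact hgt.trans ((List.pairwise_cons.mp hl).1 u h')
    rw [PySem.Dict.get?_mk_cons]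
    have : (k2 == u.2.1) = false := by simp [ne_of_lt hk2]
    rw [this]
    simp
  | case5 t ls k2 v2 rs hlt hgt ih =>
    have hkeq : t.2.1 = k2 := le_antisymm (not_lt.mp hgt) (not_lt.mp hlt)
    rw [pvMergeJoin, if_neg hlt, if_neg hgt]
    have hget : (PySem.Dict.mk ((k2, v2) :: rs)).get? t.2.1 = some v2 := by
      rw [PySem.Dict.get?_mk_cons]
      simp [hkeq]
    have htail : ls.filter (fun u => (PySem.Dict.mk ((k2, v2) :: rs)).get? u.2.1 == some u.2.2)
        = ls.filter (fun u => (PySem.Dict.mk rs).get? u.2.1 == some u.2.2) := by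
      apply List.filter_congr
      intro u hu
      have hk2 : k2 < u.2.1 := hkeq ▸ (List.pairwise_cons.mp hl).1 u hu
      rw [PySem.Dict.get?_mk_cons]
      have : (k2 == u.2.1) = false := by simp [ne_of_lt hk2]
      rw [this]
      simp
    rw [List.filter_cons, hget, ih hl.tail hr.tail, htail]
    by_cases hv : t.2.2 = v2
    · simp [hv]
    · have h1 : (t.2.2 == v2) = false := by simp [hv]
      have h2 : (some v2 == some t.2.2) = false := by simp [Ne.symm hv]
      rw [h1, h2]
      simp

-- filter of enumerate by a predicate on the value, stripped, is the filter of the list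
theorem filter_enumerate_strip (p : String × Int → Bool) :
    ∀ (l : List (String × Int)) (s : Int),
      ((PySem.List.enumerate l s).filter (fun t => p t.2)).map (fun t => t.2) = l.filter p := by
  intro l
  induction l with
  | nil => intro s; simp [PySem.List.enumerate_nil]
  | cons x xs ih =>
    intro s
    rw [PySem.List.enumerate_cons]
    by_cases hp : p x = true <;> simp [hp, ih]

-- insert-fold over triples with key-unique middles: items is the stripped list
theorem items_foldl_insert_triples :
    ∀ (l : List (Int × String × Int)) (acc : PySem.Dict String Int),
      (l.map (fun t => t.2.1)).Nodup → (∀ t ∈ l, acc.contains t.2.1 = false) →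
      (l.foldl (fun acc t => acc.insert t.2.1 t.2.2) acc).items
        = acc.items ++ l.map (fun t => t.2) := by
  intro l
  induction l with
  | nil => intro acc _ _; simp
  | cons t rest ih =>
    intro acc hnd hfresh
    simp only [List.map_cons, List.nodup_cons] at hnd
    simp only [List.foldl_cons, List.map_cons]
    rw [ih (acc.insert t.2.1 t.2.2) hnd.2]
    · rw [PySem.Dict.items_insert_of_not_contains _ _ (hfresh t (by simp))]
      simp
    · intro t' ht'
      rw [PySem.Dict.contains_insert]
      have hne : t'.2.1 ≠ t.2.1 := by
        intro h
        exact hnd.1 (h ▸ List.mem_map.mpr ⟨t', ht', rfl⟩)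
      simp [hne, hfresh t' (by simp [ht'])]

-- strictly increasing keys from weakly sorted + distinct keys
theorem pairwise_lt_of_le_nodup {α κ : Type} [LinearOrder κ] (key : α → κ) (l : List α)
    (hle : l.Pairwise (fun a b => key a ≤ key b)) (hnd : (l.map key).Nodup) :
    l.Pairwise (fun a b => key a < key b) := by
  induction l with
  | nil => exact List.Pairwise.nil
  | cons x xs ih =>
    simp only [List.map_cons, List.nodup_cons] at hnd
    rcases List.pairwise_cons.mp hle with ⟨hx, hxs⟩
    refine List.pairwise_cons.mpr ⟨?_, ih hxs hnd.2⟩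
    intro b hb
    refine lt_of_le_of_ne (hx b hb) ?_
    intro he
    exact hnd.1 (he ▸ List.mem_map.mpr ⟨b, hb, rfl⟩)

-- the whole B pipeline, for a fixed small/big pair with unique keys, is A's filter
theorem alt_pipeline (small big : List (String × Int))
    (hs : (small.map Prod.fst).Nodup) (hb : (big.map Prod.fst).Nodup) :
    ((PySem.List.sorted
        (pvMergeJoin (PySem.List.sorted (PySem.List.enumerate small) (fun t => t.2.1) false)
                     (PySem.List.sorted big (fun kv => kv.1) false))
        (fun t => t.1) false).foldl
      (fun (acc : PySem.Dict String Int) t => acc.insert t.2.1 t.2.2) PySem.Dict.empty).items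
    = small.filter (fun kv => (PySem.Dict.mk big).get? kv.1 == some kv.2) := by
  have hEkeys : (PySem.List.enumerate small).map (fun t => t.2.1) = small.map Prod.fst := by
    have h1 := PySem.List.map_snd_enumerate (xs := small) (s := 0)
    calc (PySem.List.enumerate small).map (fun t => t.2.1)
        = ((PySem.List.enumerate small).map (fun t => t.2)).map Prod.fst := by
          rw [List.map_map]; rfl
      _ = small.map Prod.fst := by rw [h1]
  have hperm_left := PySem.List.sorted_perm (xs := PySem.List.enumerate small)
      (key := fun t => t.2.1) (rev := false)
  have hperm_right := PySem.List.sorted_perm (xs := big) (key := fun kv => kv.1) (rev := false)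
  have hleft_nodup : ((PySem.List.sorted (PySem.List.enumerate small) (fun t => t.2.1) false).map
      (fun t => t.2.1)).Nodup :=
    (hperm_left.map (fun t => t.2.1)).nodup_iff.mpr (hEkeys ▸ hs)
  have hleft_lt : (PySem.List.sorted (PySem.List.enumerate small) (fun t => t.2.1) false).Pairwise
      (fun a b => a.2.1 < b.2.1) :=
    pairwise_lt_of_le_nodup (fun t : Int × String × Int => t.2.1)
      (PySem.List.sorted (PySem.List.enumerate small) (fun t => t.2.1) false)
      (PySem.List.sorted_pairwise _ _) hleft_nodup
  have hright_nodup : ((PySem.List.sorted big (fun kv => kv.1) false).map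
      (fun kv => kv.1)).Nodup :=
    (hperm_right.map (fun kv => kv.1)).nodup_iff.mpr hb
  have hright_lt : (PySem.List.sorted big (fun kv => kv.1) false).Pairwise
      (fun a b => a.1 < b.1) :=
    pairwise_lt_of_le_nodup (fun kv : String × Int => kv.1)
      (PySem.List.sorted big (fun kv => kv.1) false)
      (PySem.List.sorted_pairwise _ _) hright_nodup
  have hmerge := mergeJoin_eq_filter _ _ hleft_lt hright_lt
  -- the lookup in the sorted big list is the lookup in big
  have hlookup : ∀ k : String, (PySem.Dict.mk (PySem.List.sorted big (fun kv => kv.1) false)).get? k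
      = (PySem.Dict.mk big).get? k :=
    fun k => get?_mk_perm big _ k hperm_right.symm hb
  have hfilter : (PySem.List.sorted (PySem.List.enumerate small) (fun t => t.2.1) false).filter
        (fun t => (PySem.Dict.mk (PySem.List.sorted big (fun kv => kv.1) false)).get? t.2.1 == some t.2.2)
      = (PySem.List.sorted (PySem.List.enumerate small) (fun t => t.2.1) false).filter
        (fun t => (PySem.Dict.mk big).get? t.2.1 == some t.2.2) := by
    apply List.filter_congr
    intro u _
    rw [hlookup]
  have hpermL : ((PySem.List.enumerate small).filter
        (fun t => (PySem.Dict.mk big).get? t.2.1 == some t.2.2)).Perm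
      (pvMergeJoin (PySem.List.sorted (PySem.List.enumerate small) (fun t => t.2.1) false)
                   (PySem.List.sorted big (fun kv => kv.1) false)) := by
    rw [hmerge, hfilter]
    exact (hperm_left.filter _).symm
  have hLlt : ((PySem.List.enumerate small).filter
        (fun t => (PySem.Dict.mk big).get? t.2.1 == some t.2.2)).Pairwise
      (fun a b => a.1 < b.1) :=
    (PySem.List.pairwise_lt_enumerate (xs := small) (s := 0)).filter _
  have hsorted : PySem.List.sorted
      (pvMergeJoin (PySem.List.sorted (PySem.List.enumerate small) (fun t => t.2.1) false)
                   (PySem.List.sorted big (fun kv => kv.1) false)) (fun t => t.1) false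
      = (PySem.List.enumerate small).filter
        (fun t => (PySem.Dict.mk big).get? t.2.1 == some t.2.2) :=
    PySem.List.sorted_eq_of_perm_of_pairwise_lt _ _ _ hpermL hLlt
  rw [hsorted]
  have hLnodup : (((PySem.List.enumerate small).filter
        (fun t => (PySem.Dict.mk big).get? t.2.1 == some t.2.2)).map (fun t => t.2.1)).Nodup :=
    by
      refine List.Sublist.nodup ?_ (hEkeys ▸ hs)
      exact (List.filter_sublist).map _
  rw [items_foldl_insert_triples _ PySem.Dict.empty hLnodup
      (fun t _ => PySem.Dict.contains_empty _)]
  have hstrip : ((PySem.List.enumerate small).filter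
        (fun t => (PySem.Dict.mk big).get? t.2.1 == some t.2.2)).map (fun t => t.2)
      = small.filter (fun kv => (PySem.Dict.mk big).get? kv.1 == some kv.2) :=
    filter_enumerate_strip (fun kv => (PySem.Dict.mk big).get? kv.1 == some kv.2) small 0
  rw [hstrip]
  simp [PySem.Dict.empty]

-- ===== VERDICT (by name: the statement is the Claim_ definition above) =====
theorem dict_intersect_spec : Claim_equal_dict_intersect := by
  intro d1 d2 _ hpre
  unfold Spec_dict_intersect dict_intersect dict_intersect_alt
  by_cases h : d1.length ≤ d2.length
  · simp only [if_pos h]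
    rw [items_foldl_filter _ d1 PySem.Dict.empty hpre.1 (by intro kv _; simp)]
    rw [alt_pipeline d1 d2 hpre.1 hpre.2]
    simp only [PySem.Dict.empty]
    rw [List.filter_congr (fun kv _ => cond_eq d2 kv.1 kv.2)]
    rfl
  · simp only [if_neg h]
    rw [items_foldl_filter _ d2 PySem.Dict.empty hpre.2 (by intro kv _; simp)]
    rw [alt_pipeline d2 d1 hpre.2 hpre.1]
    simp only [PySem.Dict.empty]
    rw [List.filter_congr (fun kv _ => cond_eq d1 kv.1 kv.2)]
    rfl
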